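-- pv_equiv track=rewrite | github.com/unuchak/homework_student.itstep | stage8/stage_8_3_osn_task_3.py | ration
-- ===== SOURCE A (Python) =====
-- def ration(number):
--     # 1513
--     numbers = []
--     while number > 0:
--         number, digit = divmod(number, 10)
--         numbers.append(digit)
--
--     numbers.reverse()
--
--     if len(numbers) > 4 or len(numbers) < 4:
--         result = False
--     else:
--         result = numbers[0] + numbers[3] == numbers[1] - numbers[2]
--
--     return result
-- ===== SOURCE B (Python) =====
-- def ration(number):
--     if number < 1000 or number > 9999:
--         return False
--     return number // 1000 + number % 10 == number // 100 % 10 - number // 10 % 10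
-- ===== Notes on version B (the rewrite author's own statement) =====
-- stated objective: simpler
-- what changed: Replaces the divmod digit-extraction loop, list append and reverse with a range test plus a closed-form arithmetic digit formula.
import Mathlib
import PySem

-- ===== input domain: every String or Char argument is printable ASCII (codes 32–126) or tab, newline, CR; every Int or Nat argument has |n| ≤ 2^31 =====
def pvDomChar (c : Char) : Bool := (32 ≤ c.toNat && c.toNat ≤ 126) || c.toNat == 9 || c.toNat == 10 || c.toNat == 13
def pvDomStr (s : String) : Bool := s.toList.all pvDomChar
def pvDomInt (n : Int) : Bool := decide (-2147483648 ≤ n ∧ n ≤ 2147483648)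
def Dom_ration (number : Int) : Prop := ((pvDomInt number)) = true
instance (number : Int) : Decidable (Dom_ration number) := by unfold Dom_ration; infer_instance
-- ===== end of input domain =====

-- B replaces A's divmod digit-extraction loop + list reverse by a range test and a closed-form digit formula (same result).
-- ===== PORT A =====
-- the while loop: collects digits least-significant first into acc
def rationDigitsLoop (number : Int) (acc : List Int) : List Int :=
  if 0 < number then
    rationDigitsLoop (PySem.Int.floordiv number 10) (acc ++ [PySem.Int.mod number 10])
  else acc
termination_by number.toNat
decreasing_by
  have h10 : PySem.Int.floordiv number 10 = number / 10 :=
    PySem.Int.floordiv_eq_ediv_of_pos (by omega)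
  omega

def ration (number : Int) : Bool :=
  let numbers := (rationDigitsLoop number []).reverse
  if numbers.length > 4 || numbers.length < 4 then false
  else decide (numbers.getD 0 0 + numbers.getD 3 0 = numbers.getD 1 0 - numbers.getD 2 0)

-- ===== PORT B =====
def ration_alt (number : Int) : Bool :=
  if number < 1000 || number > 9999 then false
  else decide (PySem.Int.floordiv number 1000 + PySem.Int.mod number 10 =
               PySem.Int.mod (PySem.Int.floordiv number 100) 10 -
               PySem.Int.mod (PySem.Int.floordiv number 10) 10)

-- ===== PRECONDITION & SPEC =====
def Spec_ration (number : Int) (out : Bool) : Prop := out = ration_alt number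
instance (number : Int) (out : Bool) : Decidable (Spec_ration number out) := by unfold Spec_ration; infer_instance

-- ===== CLAIM (what is proved, stated in full; the proofs are below) =====
def Claim_equal_ration : Prop := ∀ (number : Int), Dom_ration number → Spec_ration number (ration number)

-- ===== LEMMAS AND PROOFS =====
theorem rationDigitsLoop_pos (number : Int) (acc : List Int) (h : 0 < number) :
    rationDigitsLoop number acc =
      rationDigitsLoop (PySem.Int.floordiv number 10) (acc ++ [PySem.Int.mod number 10]) := by
  rw [rationDigitsLoop]; simp [h]

theorem rationDigitsLoop_nonpos (number : Int) (acc : List Int) (h : ¬ 0 < number) :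
    rationDigitsLoop number acc = acc := by
  rw [rationDigitsLoop]; simp [h]

theorem rationDigitsLoop_len_mono (number : Int) (acc : List Int) :
    acc.length ≤ (rationDigitsLoop number acc).length := by
  induction number, acc using rationDigitsLoop.induct with
  | case1 n acc h ih =>
      rw [rationDigitsLoop_pos n acc h]
      calc acc.length ≤ (acc ++ [PySem.Int.mod n 10]).length := by simp
        _ ≤ _ := ih
  | case2 n acc h => rw [rationDigitsLoop_nonpos n acc h]

theorem ration_spec : Claim_equal_ration := by
  intro number _
  unfold Spec_ration ration ration_alt
  have hfd : ∀ a : Int, ∀ b : Int, 0 < b → PySem.Int.floordiv a b = a / b := by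
    intro a b hb; exact PySem.Int.floordiv_eq_ediv_of_pos hb
  have hmd : ∀ a : Int, ∀ b : Int, 0 < b → PySem.Int.mod a b = a % b := by
    intro a b hb; exact PySem.Int.mod_eq_emod_of_pos hb
  by_cases h0 : 0 < number
  · by_cases hbig : number ≥ 10000
    · -- at least 5 digits: loop unfolds 5 times, then length ≥ 5
      have q1 : PySem.Int.floordiv number 10 = number / 10 := hfd _ _ (by omega)
      have q2 : PySem.Int.floordiv (number / 10) 10 = number / 10 / 10 := hfd _ _ (by omega)
      have q3 : PySem.Int.floordiv (number / 10 / 10) 10 = number / 10 / 10 / 10 := hfd _ _ (by omega)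
      have q4 : PySem.Int.floordiv (number / 10 / 10 / 10) 10 = number / 10 / 10 / 10 / 10 := hfd _ _ (by omega)
      have hlen : 5 ≤ (rationDigitsLoop number []).length := by
        rw [rationDigitsLoop_pos number [] h0]
        simp only [List.nil_append, q1]
        rw [rationDigitsLoop_pos (number / 10) _ (by omega), q2,
            rationDigitsLoop_pos (number / 10 / 10) _ (by omega), q3,
            rationDigitsLoop_pos (number / 10 / 10 / 10) _ (by omega), q4,
            rationDigitsLoop_pos (number / 10 / 10 / 10 / 10) _ (by omega)]
        have := rationDigitsLoop_len_mono (PySem.Int.floordiv (number / 10 / 10 / 10 / 10) 10)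
          ([PySem.Int.mod number 10] ++ [PySem.Int.mod (number / 10) 10] ++ [PySem.Int.mod (number / 10 / 10) 10] ++
            [PySem.Int.mod (number / 10 / 10 / 10) 10] ++ [PySem.Int.mod (number / 10 / 10 / 10 / 10) 10])
        simpa using this
      have hA : ((rationDigitsLoop number []).reverse.length > 4 ||
          (rationDigitsLoop number []).reverse.length < 4) = true := by
        simp only [List.length_reverse, Bool.or_eq_true, decide_eq_true_eq]
        omega
      simp only [hA, if_true]
      have : (number < 1000 || number > 9999) = true := by
        simp only [Bool.or_eq_true, decide_eq_true_eq]; omega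
      simp [this]
    · by_cases h4 : number ≥ 1000
      · -- exactly four digits
        have hd : rationDigitsLoop number [] =
            [PySem.Int.mod number 10, PySem.Int.mod (number / 10) 10,
             PySem.Int.mod (number / 10 / 10) 10, number / 10 / 10 / 10] := by
          rw [rationDigitsLoop_pos _ _ h0, hfd number 10 (by omega),
              rationDigitsLoop_pos _ _ (by omega : (0:Int) < number / 10),
              hfd (number/10) 10 (by omega),
              rationDigitsLoop_pos _ _ (by omega : (0:Int) < number / 10 / 10),
              hfd (number/10/10) 10 (by omega),
              rationDigitsLoop_pos _ _ (by omega : (0:Int) < number / 10 / 10 / 10),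
              hfd (number/10/10/10) 10 (by omega),
              rationDigitsLoop_nonpos _ _ (by omega : ¬ (0:Int) < number / 10 / 10 / 10 / 10)]
          rw [hmd (number/10/10/10) 10 (by omega)]
          have : number / 10 / 10 / 10 % 10 = number / 10 / 10 / 10 := by omega
          simp [this]
        rw [hd]
        have hB : (number < 1000 || number > 9999) = false := by
          simp only [Bool.or_eq_false_iff, decide_eq_false_iff_not]
          constructor <;> omega
        simp only [hB, Bool.false_eq_true, if_false, List.reverse_cons, List.reverse_nil,
          List.nil_append, List.cons_append, List.length_cons, List.length_nil]
        simp only [show ¬ ((3+1 : Nat) > 4) by omega, decide_false, Bool.or_false, Bool.false_eq_true, if_false]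
        simp only [List.getD_cons_zero, List.getD_cons_succ]
        rw [hmd number 10 (by omega), hmd (number/10) 10 (by omega),
            hmd (number/10/10) 10 (by omega),
            hfd number 1000 (by omega), hfd number 100 (by omega), hfd number 10 (by omega),
            hmd (number/100) 10 (by omega), hmd (number/10) 10 (by omega)]
        have c1 : number / 10 / 10 = number / 100 := by omega
        have c3 : number / 100 / 10 = number / 1000 := by omega
        rw [c1, c3]
      · -- one to three digits: length ≤ 3
        have hd : (rationDigitsLoop number []).length ≤ 3 := by
          rw [rationDigitsLoop_pos _ _ h0, hfd number 10 (by omega)]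
          by_cases ha : 0 < number / 10
          · rw [rationDigitsLoop_pos _ _ ha, hfd (number/10) 10 (by omega)]
            by_cases hb : 0 < number / 10 / 10
            · rw [rationDigitsLoop_pos _ _ hb, hfd (number/10/10) 10 (by omega),
                  rationDigitsLoop_nonpos _ _ (by omega : ¬ (0:Int) < number / 10 / 10 / 10)]
              simp
            · rw [rationDigitsLoop_nonpos _ _ hb]; simp
          · rw [rationDigitsLoop_nonpos _ _ ha]; simp
        have hA : ((rationDigitsLoop number []).reverse.length > 4 ||
            (rationDigitsLoop number []).reverse.length < 4) = true := by
          simp only [List.length_reverse, Bool.or_eq_true, decide_eq_true_eq]; omega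
        simp only [hA, if_true]
        have : (number < 1000 || number > 9999) = true := by
          simp only [Bool.or_eq_true, decide_eq_true_eq]; omega
        simp [this]
  · -- number ≤ 0: empty digit list, both sides false
    rw [rationDigitsLoop_nonpos _ _ h0]
    have : (number < 1000 || number > 9999) = true := by
      simp only [Bool.or_eq_true, decide_eq_true_eq]; omega
    simp [this]
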